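-- pv_equiv track=rewrite | github.com/NTTDO/DODO | convolutioncode.py | encode_hex_string
-- ===== SOURCE A (Python) =====
-- def convolutional_encode(data):
--     """
--     Convolutional encoder (rate 1/2, K=3, G1=111 (7), G2=101 (5))
--     """
--     data_in = data[::-1]
--     g1 = 0b111
--     g2 = 0b101
--     shift_reg = 0
--     encoded = []
--     for bit in data_in:
--         shift_reg = ((shift_reg << 1) | bit) & 0b111  # keep last 3 bits
--         out1 = bin(shift_reg & g1).count('1') % 2
--         out2 = bin(shift_reg & g2).count('1') % 2
--         encoded.extend([out1, out2])
--     data_encoded = encoded[::-1]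
--     return data_encoded
--
-- def hex_to_bit_list(hex_str, total_bits=192):
--     """Chuyển chuỗi hex thành danh sách bit (list of int) đủ `total_bits`."""
--     bit_str = bin(int(hex_str, 16))[2:].zfill(total_bits)
--     return [int(b) for b in bit_str]
--
-- def encode_hex_string(hex_str):
--     bit_list = hex_to_bit_list(hex_str)
--     chunks = [bit_list[i:i+8] for i in range(0, len(bit_list), 8)]
--
--     encoded_stream = []
--
--     for chunk in chunks:
--         block = [int(b) for b in chunk]
--         encoded_block = convolutional_encode(block)
--         encoded_stream.extend(encoded_block)
--
--     return encoded_stream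
-- ===== SOURCE B (Python) =====
-- def _encode_chunk(c):
--     # rate-1/2 K=3 (G1=7, G2=5) code of one chunk, in the stream's output order,
--     # computed as a sliding-window XOR over the chunk bits
--     if not c:
--         return []
--     b1 = c[1] if len(c) > 1 else 0
--     b2 = c[2] if len(c) > 2 else 0
--     return [c[0] ^ b2, c[0] ^ b1 ^ b2] + _encode_chunk(c[1:])
--
-- def encode_hex_string(hex_str):
--     n = int(hex_str, 16)
--     total = max(n.bit_length(), 192)
--     nbytes = (total + 7) // 8
--     bits = []
--     for byte in n.to_bytes(nbytes, 'big'):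
--         bits += [(byte >> 7) & 1, (byte >> 6) & 1, (byte >> 5) & 1, (byte >> 4) & 1,
--                  (byte >> 3) & 1, (byte >> 2) & 1, (byte >> 1) & 1, byte & 1]
--     bits = bits[8 * nbytes - total:]
--     out = []
--     for i in range(0, total, 8):
--         out += _encode_chunk(bits[i:i+8])
--     return out
-- ===== Notes on version B (the rewrite author's own statement) =====
-- stated objective: faster
-- what changed: Replaces the per-chunk shift-register encoder (reverse input, fold a 3-bit register with binary-string popcount parities, reverse output) by a direct sliding-window XOR over the chunk bits in output order, and extracts the bit stream byte-wise via int.to_bytes instead of formatting and zero-padding a binary string.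
import Mathlib
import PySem

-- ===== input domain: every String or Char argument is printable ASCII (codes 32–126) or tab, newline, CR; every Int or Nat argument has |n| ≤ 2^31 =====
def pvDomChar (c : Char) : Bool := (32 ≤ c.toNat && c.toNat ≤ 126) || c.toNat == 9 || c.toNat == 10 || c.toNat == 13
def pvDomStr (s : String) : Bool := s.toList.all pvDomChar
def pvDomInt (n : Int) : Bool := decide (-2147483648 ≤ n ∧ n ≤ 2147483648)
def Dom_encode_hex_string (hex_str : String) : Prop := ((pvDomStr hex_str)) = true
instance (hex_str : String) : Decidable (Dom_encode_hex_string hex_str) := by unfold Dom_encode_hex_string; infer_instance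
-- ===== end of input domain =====

-- B replaces A's shift-register chunk encoder (reverse input, fold a 3-bit register with
-- binary-popcount parities, reverse output) by a sliding-window XOR in output order, and
-- extracts the bit stream byte-wise (to_bytes) instead of formatting a padded binary string.

-- ===== PORT A =====

-- convolutional_encode(data)
def pvConvEncode (data : List Int) : List Int :=
  let data_in := (PySem.List.slice? data none none (-1)).getD []
  let st := data_in.foldl (fun (s : Int × List Int) bit =>
      let reg := PySem.Int.band (PySem.Int.bor (s.1 <<< (1:Nat)) bit) 7
      let out1 := PySem.Int.mod ((PySem.Int.bitCount (PySem.Int.band reg 7) : Int)) 2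
      let out2 := PySem.Int.mod ((PySem.Int.bitCount (PySem.Int.band reg 5) : Int)) 2
      (reg, s.2 ++ [out1, out2])) (0, [])
  (PySem.List.slice? st.2 none none (-1)).getD []

-- hex_to_bit_list(hex_str, total_bits); none = the ValueError of int(): either the hex parse
-- fails, or n < 0 and the per-character int() hits the letter left over from the stripped prefix
def pvHexToBitList (hex_str : String) (total_bits : Int) : Option (List Int) :=
  match PySem.Int.ofStrBase? hex_str 16 with
  | none => none
  | some n =>
    let bit_str0 := PySem.List.slice (PySem.Int.toBinChars0b n) (some 2) none
    let bit_str := List.replicate (total_bits.toNat - bit_str0.length) '0' ++ bit_str0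
    bit_str.mapM (fun c => PySem.Int.ofChars? [c])

-- encode_hex_string(hex_str)
def encode_hex_string (hex_str : String) : List Int :=
  match pvHexToBitList hex_str 192 with
  | none => []
  | some bit_list =>
    let chunks := (PySem.List.pyRange 0 (PySem.List.len bit_list) 8).map
        (fun i => PySem.List.slice bit_list (some i) (some (i + 8)))
    chunks.foldl (fun acc chunk => acc ++ pvConvEncode (chunk.map (fun b => b))) []


-- ===== PORT B =====

-- _encode_chunk(c): sliding-window XOR encoder
def pvEncChunk : List Int → List Int
  | [] => []
  | c0 :: rest =>
    let b1 := rest.headD 0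
    let b2 := (rest.drop 1).headD 0
    PySem.Int.bxor c0 b2 :: PySem.Int.bxor (PySem.Int.bxor c0 b1) b2 :: pvEncChunk rest

-- n.to_bytes(k, 'big') ported by hand; exact for 0 ≤ n < 256^k (Python raises OverflowError
-- otherwise, which only happens outside Pre_)
def pvToBytes : Nat → Int → List Int
  | 0, _ => []
  | k + 1, m => pvToBytes k (m >>> (8:Nat)) ++ [PySem.Int.band m 255]

-- the 8 bits of one byte, MSB first
def pvBits8 (b : Int) : List Int :=
  [PySem.Int.band (b >>> (7:Nat)) 1, PySem.Int.band (b >>> (6:Nat)) 1,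
   PySem.Int.band (b >>> (5:Nat)) 1, PySem.Int.band (b >>> (4:Nat)) 1,
   PySem.Int.band (b >>> (3:Nat)) 1, PySem.Int.band (b >>> (2:Nat)) 1,
   PySem.Int.band (b >>> (1:Nat)) 1, PySem.Int.band b 1]


-- encode_hex_string(hex_str), implementation B
def encode_hex_string_alt (hex_str : String) : List Int :=
  match PySem.Int.ofStrBase? hex_str 16 with
  | none => []
  | some n =>
    let total := max (PySem.Int.bitLength n) 192
    let nbytes := (total + 7) / 8
    let bits0 := (pvToBytes nbytes n).foldl (fun acc byte => acc ++ pvBits8 byte) []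
    let bits := PySem.List.slice bits0 (some ((8 * nbytes - total : Nat) : Int)) none
    (PySem.List.pyRange 0 (total : Int) 8).foldl
        (fun acc i => acc ++ pvEncChunk (PySem.List.slice bits (some i) (some (i + 8)))) []


-- ===== PRECONDITION & SPEC =====
-- Pre_: int(hex_str, 16) parses and the value is nonnegative — exactly the inputs A returns on:
-- A raises ValueError from int() on unparseable strings, and for negative values ValueError from
-- the per-character int() on the letter left in the sliced binary string (B also raises on both:
-- ValueError from int(), then OverflowError from to_bytes).
def Pre_encode_hex_string (hex_str : String) : Prop :=
  ((PySem.Int.ofStrBase? hex_str 16).any (fun n => decide (0 ≤ n))) = true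
instance (hex_str : String) : Decidable (Pre_encode_hex_string hex_str) := by
  unfold Pre_encode_hex_string; infer_instance

def pvWitness_encode_hex_string : String := "ff"

def Spec_encode_hex_string (hex_str : String) (out : List Int) : Prop := out = encode_hex_string_alt hex_str
instance (hex_str : String) (out : List Int) : Decidable (Spec_encode_hex_string hex_str out) := by
  unfold Spec_encode_hex_string; infer_instance

-- ===== CLAIM (what is proved, stated in full; the proofs are below) =====
def Claim_equal_encode_hex_string : Prop := ∀ (hex_str : String), Dom_encode_hex_string hex_str → Pre_encode_hex_string hex_str → Spec_encode_hex_string hex_str (encode_hex_string hex_str)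

-- ===== LEMMAS AND PROOFS =====

def pvNBits (m : Nat) : Nat := max (PySem.Int.bitLength (m:Int)) 1
def pvPadBits (L m : Nat) : List Int :=
  (List.range (max L (pvNBits m))).map (fun i => ((m >>> (max L (pvNBits m) - 1 - i) % 2 : Nat) : Int))
def pvBitsN (m : Nat) : List Int := pvPadBits 0 m

theorem pvNBits_of_ge_two (m : Nat) (h : 2 ≤ m) : pvNBits m = pvNBits (m/2) + 1 := by
  unfold pvNBits
  rw [PySem.Int.bitLength_natCast (m := m) (by omega)]
  have h1 : 1 ≤ PySem.Int.bitLength ((m/2 : Nat) : Int) := by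
    have h2 := PySem.Int.lt_two_pow_bitLength ((m/2 : Nat) : Int)
    by_contra hc
    simp only [not_le, Nat.lt_one_iff] at hc
    rw [hc] at h2
    simp at h2
    omega
  omega

theorem pvNBits_le_one (m : Nat) (h : m ≤ 1) : pvNBits m = 1 := by
  interval_cases m <;> decide

theorem pvBitsN_length (m : Nat) : (pvBitsN m).length = pvNBits m := by
  simp [pvBitsN, pvPadBits]

theorem pvPadBits_length (L m : Nat) : (pvPadBits L m).length = max L (pvNBits m) := by
  simp [pvPadBits]

theorem pvP1 (L m : Nat) (h : 1 ≤ L ∨ 2 ≤ m) :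
    pvPadBits L (m/2) ++ [((m % 2 : Nat) : Int)] = pvPadBits (L+1) m := by
  have hT : max L (pvNBits (m/2)) + 1 = max (L+1) (pvNBits m) := by
    rcases Nat.lt_or_ge m 2 with hm | hm
    · have h0 : m / 2 = 0 := by omega
      rw [h0, pvNBits_le_one 0 (by omega), pvNBits_le_one m (by omega)]
      omega
    · rw [pvNBits_of_ge_two m hm]
      have : 1 ≤ pvNBits (m/2) := by unfold pvNBits; omega
      omega
  unfold pvPadBits
  rw [← hT]
  set T := max L (pvNBits (m/2)) with hTdef
  rw [List.range_succ, List.map_append]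
  congr 1
  · apply List.map_congr_left
    intro i hi
    simp only [List.mem_range] at hi
    have h1 : T + 1 - 1 - i = (T - 1 - i) + 1 := by omega
    rw [h1, Nat.shiftRight_succ_inside]
  · simp

theorem pvShiftZero (m s : Nat) (h : pvNBits m ≤ s) : m >>> s = 0 := by
  rw [Nat.shiftRight_eq_div_pow]
  have h1 : m < 2 ^ s := by
    have h2 := PySem.Int.lt_two_pow_bitLength ((m : Nat) : Int)
    simp at h2
    calc m < 2 ^ PySem.Int.bitLength (m : Int) := h2
    _ ≤ 2 ^ s := Nat.pow_le_pow_right (by omega) (by unfold pvNBits at h; omega)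
  exact Nat.div_eq_of_lt h1

-- replicate-padding form equals the closed form
theorem pvR1 (L m : Nat) :
    List.replicate (L - (pvBitsN m).length) (0:Int) ++ pvBitsN m = pvPadBits L m := by
  rw [pvBitsN_length]
  set N := pvNBits m with hN
  have hN1 : 1 ≤ N := by unfold pvNBits at hN; omega
  have hT : max L N = (L - N) + N := by omega
  unfold pvPadBits
  rw [hT]
  rw [List.range_add, List.map_append]
  congr 1
  · refine (List.eq_replicate_iff.mpr ⟨by simp, ?_⟩).symm
    intro b hb
    simp only [List.mem_map, List.mem_range] at hb
    obtain ⟨i, hi, hbi⟩ := hb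
    rw [pvShiftZero m (L - N + N - 1 - i) (by omega)] at hbi
    simp at hbi
    omega
  · unfold pvBitsN pvPadBits
    rw [← hN]
    rw [List.map_map]
    apply List.map_congr_left
    intro i hi
    simp only [List.mem_range] at hi
    simp only [Function.comp_apply]
    have h1 : max 0 N = N := by omega
    have h2 : L - N + N - 1 - (L - N + i) = N - 1 - i := by omega
    rw [h1, h2]

theorem pvBits8_eq (v : Nat) :
    pvBits8 ((v:Nat) : Int) = [((v >>> 7 % 2 : Nat) : Int), ((v >>> 6 % 2 : Nat) : Int),
      ((v >>> 5 % 2 : Nat) : Int), ((v >>> 4 % 2 : Nat) : Int), ((v >>> 3 % 2 : Nat) : Int),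
      ((v >>> 2 % 2 : Nat) : Int), ((v >>> 1 % 2 : Nat) : Int), ((v % 2 : Nat) : Int)] := by
  have hcast : ∀ k : Nat, ((v:Int) >>> k) = ((v >>> k : Nat) : Int) := fun k => rfl
  have hband : ∀ w : Nat, PySem.Int.band ((w:Nat):Int) 1 = ((w % 2 : Nat) : Int) := by
    intro w
    have : ((1:Int)) = ((1:Nat):Int) := rfl
    rw [this, PySem.Int.band_natCast, Nat.and_one_is_mod]
  simp only [pvBits8, hcast, hband]

theorem pvPad_congr (L1 L2 m : Nat) (h : max L1 (pvNBits m) = max L2 (pvNBits m)) :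
    pvPadBits L1 m = pvPadBits L2 m := by
  unfold pvPadBits
  rw [h]

theorem pvE6 (L m : Nat) (hL : 1 ≤ L) :
    pvPadBits L (m/256) ++ pvBits8 ((m % 256 : Nat) : Int) = pvPadBits (L+8) m := by
  rw [pvBits8_eq]
  have hsr : ∀ k : Nat, (m % 256) >>> k = m % 256 / 2 ^ k := fun k => Nat.shiftRight_eq_div_pow (m % 256) k
  have e7 : (m % 256) >>> 7 % 2 = m/2/2/2/2/2/2/2 % 2 := by rw [hsr]; norm_num; simp only [Nat.div_div_eq_div_mul]; norm_num; omega
  have e6 : (m % 256) >>> 6 % 2 = m/2/2/2/2/2/2 % 2 := by rw [hsr]; norm_num; simp only [Nat.div_div_eq_div_mul]; norm_num; omega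
  have e5 : (m % 256) >>> 5 % 2 = m/2/2/2/2/2 % 2 := by rw [hsr]; norm_num; simp only [Nat.div_div_eq_div_mul]; norm_num; omega
  have e4 : (m % 256) >>> 4 % 2 = m/2/2/2/2 % 2 := by rw [hsr]; norm_num; simp only [Nat.div_div_eq_div_mul]; norm_num; omega
  have e3 : (m % 256) >>> 3 % 2 = m/2/2/2 % 2 := by rw [hsr]; norm_num; simp only [Nat.div_div_eq_div_mul]; norm_num; omega
  have e2 : (m % 256) >>> 2 % 2 = m/2/2 % 2 := by rw [hsr]; norm_num; simp only [Nat.div_div_eq_div_mul]; norm_num; omega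
  have e1 : (m % 256) >>> 1 % 2 = m/2 % 2 := by rw [hsr]; norm_num; omega
  have e0 : m % 256 % 2 = m % 2 := by omega
  have ed : m / 256 = m/2/2/2/2/2/2/2/2 := by simp only [Nat.div_div_eq_div_mul]
  rw [e7, e6, e5, e4, e3, e2, e1, e0, ed]
  rw [← pvP1 (L+7) m (Or.inl (by omega))]
  rw [← pvP1 (L+6) (m/2) (Or.inl (by omega))]
  rw [← pvP1 (L+5) (m/2/2) (Or.inl (by omega))]
  rw [← pvP1 (L+4) (m/2/2/2) (Or.inl (by omega))]
  rw [← pvP1 (L+3) (m/2/2/2/2) (Or.inl (by omega))]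
  rw [← pvP1 (L+2) (m/2/2/2/2/2) (Or.inl (by omega))]
  rw [← pvP1 (L+1) (m/2/2/2/2/2/2) (Or.inl (by omega))]
  rw [← pvP1 L (m/2/2/2/2/2/2/2) (Or.inl (by omega))]
  simp [List.append_assoc]

theorem pvBandByte (m : Nat) : PySem.Int.band ((m:Nat):Int) 255 = ((m % 256 : Nat) : Int) := by
  have h255 : ((255:Int)) = ((255:Nat):Int) := rfl
  rw [h255, PySem.Int.band_natCast]
  congr 1
  simpa using Nat.and_two_pow_sub_one_eq_mod m 8

theorem pvNBits_le_eight (m : Nat) (h : m < 256) : pvNBits m ≤ 8 := by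
  unfold pvNBits
  rcases Nat.eq_zero_or_pos m with h0 | h0
  · subst h0; decide
  · have h2 := PySem.Int.two_pow_bitLength_le ((m:Nat):Int) (by simp; omega)
    simp at h2
    by_contra hc
    have : 2 ^ 8 ≤ 2 ^ (PySem.Int.bitLength ((m:Nat):Int) - 1) := Nat.pow_le_pow_right (by omega) (by omega)
    simp at this
    omega

theorem pvBase8 (m : Nat) (h : m < 256) : pvBits8 ((m:Nat):Int) = pvPadBits 8 m := by
  rw [pvBits8_eq]
  have hT : max 8 (pvNBits m) = 8 := by have := pvNBits_le_eight m h; omega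
  unfold pvPadBits
  rw [hT]
  have hr : List.range 8 = [0,1,2,3,4,5,6,7] := rfl
  rw [hr]
  simp [Nat.shiftRight_eq_div_pow]

theorem pvL4 : ∀ (k m : Nat), m < 256 ^ k → 1 ≤ k →
    List.flatMap pvBits8 (pvToBytes k ((m:Nat):Int)) = pvPadBits (8*k) m := by
  intro k
  induction k with
  | zero => omega
  | succ j ih =>
    intro m hm _
    by_cases hj : j = 0
    · subst hj
      simp only [pvToBytes]
      rw [pvBandByte]
      have : m % 256 = m := by omega
      rw [this]
      simp only [List.flatMap_append, List.flatMap_cons, List.flatMap_nil]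
      simp only [List.nil_append, List.append_nil]
      have hm' : m < 256 := by simpa using hm
      rw [pvBase8 m hm']
    · simp only [pvToBytes]
      have hc8 : ((m:Int) >>> (8:Nat)) = ((m >>> 8 : Nat) : Int) := rfl
      have hd : m >>> 8 = m / 256 := by rw [Nat.shiftRight_eq_div_pow]
      rw [hc8, hd, List.flatMap_append]
      rw [ih (m/256) (by rw [Nat.div_lt_iff_lt_mul (by omega)]; rw [pow_succ] at hm; omega) (by omega)]
      rw [pvBandByte]
      simp only [List.flatMap_cons, List.flatMap_nil, List.append_nil]
      rw [pvE6 (8*j) m (by omega)]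
      have h8 : 8*j + 8 = 8*(j+1) := by omega
      rw [h8]

theorem pvDrop (j L m : Nat) (h : pvNBits m ≤ L) :
    (pvPadBits (j + L) m).drop j = pvPadBits L m := by
  unfold pvPadBits
  have h1 : max (j + L) (pvNBits m) = j + L := by omega
  have h2 : max L (pvNBits m) = L := by omega
  simp only [h1, h2, List.range_add, List.map_append]
  rw [List.drop_left' (by simp)]
  rw [List.map_map]
  apply List.map_congr_left
  intro i hi
  simp only [List.mem_range] at hi
  simp only [Function.comp_apply]
  have h3 : j + L - 1 - (j + i) = L - 1 - i := by omega
  rw [h3]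

def pvBitChar (b : Int) : Char := if b = 1 then '1' else '0'

theorem pvBitsN_zero : pvBitsN 0 = [0] := by decide
theorem pvBitsN_one : pvBitsN 1 = [1] := by decide

theorem pvBitsN_rec (m : Nat) (h : 2 ≤ m) : pvBitsN m = pvBitsN (m/2) ++ [((m % 2 : Nat) : Int)] := by
  have h1 := pvP1 0 m (Or.inr h)
  have h2 : pvPadBits 1 m = pvPadBits 0 m := by
    apply pvPad_congr
    have : 1 ≤ pvNBits m := by unfold pvNBits; omega
    omega
  unfold pvBitsN
  rw [← h2, ← h1]

theorem pvToDigitsCore2 : ∀ (f n : Nat) (acc : List Char), n < f →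
    Nat.toDigitsCore 2 f n acc = (pvBitsN n).map pvBitChar ++ acc := by
  intro f
  induction f with
  | zero => omega
  | succ f ih =>
    intro n acc hn
    conv_lhs => rw [Nat.toDigitsCore]
    split_ifs with h0
    · have hn2 : n < 2 := by omega
      interval_cases n
      · rw [pvBitsN_zero]; rfl
      · rw [pvBitsN_one]; rfl
    · have hn2 : 2 ≤ n := by omega
      rw [ih (n/2) _ (by omega)]
      rw [pvBitsN_rec n hn2, List.map_append]
      have hd : pvBitChar (((n % 2 : Nat) : Int)) = (n % 2).digitChar := by
        rcases Nat.mod_two_eq_zero_or_one n with h | h <;> rw [h] <;> rfl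
      have hc : ((n:Int) % 2) = (((n % 2 : Nat)) : Int) := by push_cast; ring
      simp
      rw [hc, hd]

theorem pvToDigits2 (m : Nat) : Nat.toDigits 2 m = (pvBitsN m).map pvBitChar := by
  unfold Nat.toDigits
  rw [pvToDigitsCore2 (m+1) m [] (by omega)]
  simp

theorem pvBitsN_01 (m : Nat) : ∀ x ∈ pvBitsN m, x = 0 ∨ x = 1 := by
  intro x hx
  unfold pvBitsN pvPadBits at hx
  simp only [List.mem_map, List.mem_range] at hx
  obtain ⟨i, _, hi⟩ := hx
  omega

theorem pvPad_01 (L m : Nat) : ∀ x ∈ pvPadBits L m, x = 0 ∨ x = 1 := by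
  intro x hx
  unfold pvPadBits at hx
  simp only [List.mem_map, List.mem_range] at hx
  obtain ⟨i, _, hi⟩ := hx
  omega

theorem pvMapM : ∀ (cs : List Char), (∀ c ∈ cs, c = '0' ∨ c = '1') →
    cs.mapM (fun c => PySem.Int.ofChars? [c]) = some (cs.map (fun c => if c = '1' then (1:Int) else 0)) := by
  intro cs
  induction cs with
  | nil => intro _; rfl
  | cons c cs ih =>
    intro h
    have hc := h c (by simp)
    have ht := ih (fun x hx => h x (by simp [hx]))
    rcases hc with rfl | rfl <;>
      simp only [List.mapM_cons, ht] <;> rfl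

theorem pvRoundTrip (m : Nat) :
    ((pvBitsN m).map pvBitChar).map (fun c => if c = '1' then (1:Int) else 0) = pvBitsN m := by
  rw [List.map_map]
  conv_rhs => rw [← List.map_id (pvBitsN m)]
  apply List.map_congr_left
  intro b hb
  rcases pvBitsN_01 m b hb with rfl | rfl <;> rfl

theorem pvDigitChars01 (m : Nat) : ∀ c ∈ (pvBitsN m).map pvBitChar, c = '0' ∨ c = '1' := by
  intro c hc
  simp only [List.mem_map] at hc
  obtain ⟨b, hb, rfl⟩ := hc
  rcases pvBitsN_01 m b hb with rfl | rfl
  · left; rfl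
  · right; rfl

def pvStep (s : Int × List Int) (bit : Int) : Int × List Int :=
  let reg := PySem.Int.band (PySem.Int.bor (s.1 <<< (1:Nat)) bit) 7
  let out1 := PySem.Int.mod ((PySem.Int.bitCount (PySem.Int.band reg 7) : Int)) 2
  let out2 := PySem.Int.mod ((PySem.Int.bitCount (PySem.Int.band reg 5) : Int)) 2
  (reg, s.2 ++ [out1, out2])

def pvRegStep (r bit : Int) : Int := PySem.Int.band (PySem.Int.bor (r <<< (1:Nat)) bit) 7

theorem pvConv_eq_foldl (data : List Int) :
    pvConvEncode data = (data.reverse.foldl pvStep (0, [])).2.reverse := by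
  unfold pvConvEncode pvStep
  simp only [PySem.List.slice?_none_none_neg_one, Option.getD_some]

theorem pvFoldl_fst : ∀ (l : List Int) (r : Int) (e : List Int),
    (l.foldl pvStep (r, e)).1 = l.foldl pvRegStep r := by
  intro l
  induction l with
  | nil => intro r e; rfl
  | cons a l ih =>
    intro r e
    rw [List.foldl_cons, List.foldl_cons]
    exact ih _ _

theorem pvRegBound : ∀ (l : List Int) (r : Int),
    (∀ x ∈ l, x = 0 ∨ x = 1) → 0 ≤ r → r < 8 →
    0 ≤ l.foldl pvRegStep r ∧ l.foldl pvRegStep r < 8 := by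
  intro l
  induction l with
  | nil => intro r _ h0 h1; exact ⟨h0, h1⟩
  | cons a l ih =>
    intro r hl h0 h1
    rw [List.foldl_cons]
    have ha := hl a (by simp)
    have hstep : 0 ≤ pvRegStep r a ∧ pvRegStep r a < 8 := by
      unfold pvRegStep
      interval_cases r <;> rcases ha with rfl | rfl <;> exact ⟨by decide, by decide⟩
    exact ih (pvRegStep r a) (fun x hx => hl x (by simp [hx])) hstep.1 hstep.2

theorem pvRegLow2 : ∀ (l : List Int), (∀ x ∈ l, x = 0 ∨ x = 1) →
    PySem.Int.band (l.reverse.foldl pvRegStep 0) 3 = l.headD 0 + 2 * ((l.drop 1).headD 0) := by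
  intro l hl
  match l with
  | [] => decide
  | [a] =>
    have ha := hl a (by simp)
    rcases ha with rfl | rfl <;> decide
  | a :: b :: t =>
    have ha := hl a (by simp)
    have hb := hl b (by simp)
    have ht : ∀ x ∈ t.reverse, x = 0 ∨ x = 1 := by
      intro x hx; exact hl x (by simp at hx; simp [hx])
    have hrev : (a :: b :: t).reverse = (t.reverse ++ [b]) ++ [a] := by simp
    rw [hrev, List.foldl_append, List.foldl_append]
    obtain ⟨hr0, hr1⟩ := pvRegBound t.reverse 0 ht (by decide) (by decide)
    set r := t.reverse.foldl pvRegStep 0 with hrdef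
    clear_value r
    simp only [List.foldl_cons, List.foldl_nil]
    simp only [List.headD_cons, List.drop_succ_cons, List.drop_zero]
    interval_cases r <;> rcases ha with rfl | rfl <;> rcases hb with rfl | rfl <;> decide

theorem pvOuts (r x c1 c2 : Int) (hr0 : 0 ≤ r) (hr1 : r < 8)
    (hx : x = 0 ∨ x = 1) (h1 : c1 = 0 ∨ c1 = 1) (h2 : c2 = 0 ∨ c2 = 1)
    (hlow : PySem.Int.band r 3 = c1 + 2 * c2) :
    PySem.Int.mod ((PySem.Int.bitCount (PySem.Int.band (pvRegStep r x) 5) : Int)) 2 = PySem.Int.bxor x c2 ∧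
    PySem.Int.mod ((PySem.Int.bitCount (PySem.Int.band (pvRegStep r x) 7) : Int)) 2 = PySem.Int.bxor (PySem.Int.bxor x c1) c2 := by
  interval_cases r <;> rcases hx with rfl|rfl <;> rcases h1 with rfl|rfl <;> rcases h2 with rfl|rfl <;>
    revert hlow <;> decide

theorem pvConv_cons (x : Int) (rest : List Int) (h : ∀ y ∈ x :: rest, y = 0 ∨ y = 1) :
    pvConvEncode (x :: rest) =
      PySem.Int.bxor x ((rest.drop 1).headD 0) ::
      PySem.Int.bxor (PySem.Int.bxor x (rest.headD 0)) ((rest.drop 1).headD 0) :: pvConvEncode rest := by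
  have hx := h x (by simp)
  have hrest : ∀ y ∈ rest, y = 0 ∨ y = 1 := fun y hy => h y (by simp [hy])
  have hrev : ∀ y ∈ rest.reverse, y = 0 ∨ y = 1 := by
    intro y hy; exact hrest y (by simpa using hy)
  have hc1 : rest.headD 0 = 0 ∨ rest.headD 0 = 1 := by
    cases rest with
    | nil => left; rfl
    | cons u t => exact hrest u (by simp)
  have hc2 : (rest.drop 1).headD 0 = 0 ∨ (rest.drop 1).headD 0 = 1 := by
    cases rest with
    | nil => left; rfl
    | cons u t =>
      cases t with
      | nil => left; rfl
      | cons v tt => exact hrest v (by simp)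
  rw [pvConv_eq_foldl, pvConv_eq_foldl]
  rw [List.reverse_cons, List.foldl_append]
  simp only [List.foldl_cons, List.foldl_nil]
  have hsnd : ∀ (s : Int × List Int) (b : Int), (pvStep s b).2 =
      s.2 ++ [PySem.Int.mod ((PySem.Int.bitCount (PySem.Int.band (pvRegStep s.1 b) 7) : Int)) 2,
              PySem.Int.mod ((PySem.Int.bitCount (PySem.Int.band (pvRegStep s.1 b) 5) : Int)) 2] :=
    fun s b => rfl
  rw [hsnd, List.reverse_append]
  have hfst := pvFoldl_fst rest.reverse 0 []
  obtain ⟨hr0, hr1⟩ := pvRegBound rest.reverse 0 hrev (by decide) (by decide)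
  have hlow := pvRegLow2 rest hrest
  rw [← hfst] at hr0 hr1 hlow
  obtain ⟨ho2, ho1⟩ := pvOuts ((rest.reverse.foldl pvStep ((0:Int), ([]:List Int))).1) x
      (rest.headD 0) ((rest.drop 1).headD 0) hr0 hr1 hx hc1 hc2 hlow
  rw [ho2, ho1]
  rfl

theorem pvConv_eq_enc : ∀ (c : List Int), (∀ y ∈ c, y = 0 ∨ y = 1) → pvConvEncode c = pvEncChunk c := by
  intro c
  induction c with
  | nil => intro _; rfl
  | cons x rest ih =>
    intro h
    rw [pvConv_cons x rest h]
    rw [ih (fun y hy => h y (by simp [hy]))]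
    rfl

theorem pv_main (s : String) (n : Int) (h : PySem.Int.ofStrBase? s 16 = some n) (hn : 0 ≤ n) :
    encode_hex_string s = encode_hex_string_alt s := by
  set m := n.toNat with hmdef
  have hm : n = (m : Int) := (Int.toNat_of_nonneg hn).symm
  set B := PySem.Int.bitLength n with hBdef
  set total := max B 192 with htotdef
  set nbytes := (total + 7) / 8 with hnbdef
  have hBm : PySem.Int.bitLength ((m:Nat) : Int) = B := by rw [← hm]
  have hN1 : 1 ≤ pvNBits m := by unfold pvNBits; omega
  have hNB : pvNBits m = max B 1 := by unfold pvNBits; rw [hBm]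
  have hNle : pvNBits m ≤ total := by omega
  have htot8 : total ≤ 8 * nbytes := by omega
  have hnb1 : 1 ≤ nbytes := by omega
  have hmlt : m < 256 ^ nbytes := by
    have h1 := PySem.Int.lt_two_pow_bitLength ((m:Nat):Int)
    simp only [Int.natAbs_natCast] at h1
    rw [hBm] at h1
    calc m < 2 ^ B := h1
    _ ≤ 2 ^ (8 * nbytes) := Nat.pow_le_pow_right (by omega) (by omega)
    _ = 256 ^ nbytes := by rw [show (256:Nat) = 2^8 from rfl, ← pow_mul]
  -- A side bit list
  have hA : pvHexToBitList s 192 = some (pvPadBits total m) := by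
    have hred : pvHexToBitList s 192 =
        (List.replicate ((192:Int).toNat - (PySem.List.slice (PySem.Int.toBinChars0b n) (some 2) none).length) '0'
          ++ PySem.List.slice (PySem.Int.toBinChars0b n) (some 2) none).mapM (fun c => PySem.Int.ofChars? [c]) := by
      unfold pvHexToBitList
      rw [h]
    rw [hred]
    have hbin : PySem.List.slice (PySem.Int.toBinChars0b n) (some 2) none = Nat.toDigits 2 m := by
      unfold PySem.Int.toBinChars0b
      rw [if_neg (by omega)]
      rw [PySem.List.slice_from _ (by norm_num : (0:Int) ≤ 2)]
      rfl
    rw [hbin, pvToDigits2 m]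
    have hchars : ∀ c ∈ List.replicate ((192:Int).toNat - ((pvBitsN m).map pvBitChar).length) '0'
        ++ (pvBitsN m).map pvBitChar, c = '0' ∨ c = '1' := by
      intro c hc
      rcases List.mem_append.mp hc with hc | hc
      · left; exact List.eq_of_mem_replicate hc
      · exact pvDigitChars01 m c hc
    rw [pvMapM _ hchars]
    congr 1
    rw [List.map_append, pvRoundTrip]
    have hrep : (List.replicate ((192:Int).toNat - ((pvBitsN m).map pvBitChar).length) '0').map
        (fun c => if c = '1' then (1:Int) else 0) = List.replicate (192 - (pvBitsN m).length) 0 := by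
      rw [List.map_replicate, List.length_map]
      rfl
    rw [hrep, pvR1]
    apply pvPad_congr
    omega
  -- B side bit list
  have hBbits : (pvToBytes nbytes n).foldl (fun acc byte => acc ++ pvBits8 byte) [] = pvPadBits (8 * nbytes) m := by
    rw [PySem.List.foldl_append_eq_flatMap, List.nil_append, hm]
    exact pvL4 nbytes m hmlt hnb1
  have hBslice : PySem.List.slice (pvPadBits (8 * nbytes) m) (some ((8 * nbytes - total : Nat) : Int)) none
      = pvPadBits total m := by
    rw [PySem.List.slice_from _ (by positivity)]
    rw [Int.toNat_natCast]
    have h8 : 8 * nbytes = (8 * nbytes - total) + total := by omega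
    rw [show pvPadBits (8 * nbytes) m = pvPadBits ((8 * nbytes - total) + total) m from by rw [← h8]]
    exact pvDrop (8 * nbytes - total) total m hNle
  have hlen : (pvPadBits total m).length = total := by
    rw [pvPadBits_length]; omega
  -- both sides reduced
  have hAside : encode_hex_string s =
      ((PySem.List.pyRange 0 (PySem.List.len (pvPadBits total m)) 8).map
        (fun i => PySem.List.slice (pvPadBits total m) (some i) (some (i + 8)))).foldl
        (fun acc chunk => acc ++ pvConvEncode (chunk.map (fun b => b))) [] := by
    unfold encode_hex_string
    rw [hA]
  have hBside : encode_hex_string_alt s =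
      (PySem.List.pyRange 0 (total : Int) 8).foldl
        (fun acc i => acc ++ pvEncChunk (PySem.List.slice
          (PySem.List.slice ((pvToBytes nbytes n).foldl (fun acc byte => acc ++ pvBits8 byte) [])
            (some ((8 * nbytes - total : Nat) : Int)) none)
          (some i) (some (i + 8)))) [] := by
    unfold encode_hex_string_alt
    rw [h]
  rw [hAside, hBside, hBbits, hBslice]
  rw [PySem.List.len_eq, hlen]
  rw [PySem.List.foldl_append_eq_flatMap, PySem.List.foldl_append_eq_flatMap, List.nil_append,
      List.nil_append, List.flatMap_map]
  apply List.flatMap_congr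
  intro i _
  rw [List.map_id']
  apply pvConv_eq_enc
  intro y hy
  exact pvPad_01 total m y (PySem.List.mem_of_mem_slice _ _ _ hy)

-- ===== VERDICT (by name: the statement is the Claim_ definition above) =====
theorem encode_hex_string_spec : Claim_equal_encode_hex_string := by
  intro s _ hpre
  unfold Spec_encode_hex_string
  unfold Pre_encode_hex_string at hpre
  cases h : PySem.Int.ofStrBase? s 16 with
  | none => rw [h] at hpre; simp at hpre
  | some n =>
    rw [h] at hpre
    simp only [Option.any_some] at hpre
    exact pv_main s n h (of_decide_eq_true hpre)
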